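-- pv_equiv track=rewrite | github.com/lusoris/revenge | scripts/automation/toc_generator.py | remove_existing_toc
-- ===== SOURCE A (Python) =====
-- def remove_existing_toc(content: str) -> str:
--     """Remove existing TOC from content.
--
--     Args:
--         content: Markdown content
--
--     Returns:
--         Content with TOC removed
--     """
--     # Find TOC section
--     toc_start = content.find("## Table of Contents")
--     if toc_start == -1:
--         return content
--
--     # Find next header (any level) or horizontal rule after TOC
--     # Look for patterns: \n# , \n## , \n### , or \n---
--     search_from = toc_start + len("## Table of Contents")
--
--     # Try to find next section marker
--     patterns = [
--         content.find("\n---", search_from),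
--         content.find("\n# ", search_from),
--         content.find("\n## ", search_from),
--     ]
--
--     # Filter out -1 (not found) and get minimum position
--     valid_positions = [p for p in patterns if p != -1]
--
--     if valid_positions:
--         next_section = min(valid_positions)
--         # Remove TOC section up to (but not including) the newline before next section
--         return content[:toc_start] + content[next_section + 1:]
--     # TOC is at the end
--     return content[:toc_start]
-- ===== SOURCE B (Python) =====
-- def remove_existing_toc(content: str) -> str:
--     """Remove existing TOC from content (single left-to-right scan)."""
--     toc_start = content.find("## Table of Contents")
--     if toc_start == -1:
--         return content
--
--     # Single scan from the end of the TOC heading: stop at the first newline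
--     # followed by '---', '# ', or '## ' (equals the min of the three finds).
--     i = toc_start + len("## Table of Contents")
--     n = len(content)
--     while i < n:
--         if content[i] == "\n" and (
--             content.startswith("---", i + 1)
--             or content.startswith("# ", i + 1)
--             or content.startswith("## ", i + 1)
--         ):
--             return content[:toc_start] + content[i + 1:]
--         i += 1
--     return content[:toc_start]
-- ===== Notes on version B (the rewrite author's own statement) =====
-- stated objective: alternative
-- what changed: Replaces the three separate substring searches, the -1 filter and min() with a single left-to-right scan that stops at the first newline followed by a horizontal rule or a level-1/level-2 header marker.
import Mathlib
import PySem

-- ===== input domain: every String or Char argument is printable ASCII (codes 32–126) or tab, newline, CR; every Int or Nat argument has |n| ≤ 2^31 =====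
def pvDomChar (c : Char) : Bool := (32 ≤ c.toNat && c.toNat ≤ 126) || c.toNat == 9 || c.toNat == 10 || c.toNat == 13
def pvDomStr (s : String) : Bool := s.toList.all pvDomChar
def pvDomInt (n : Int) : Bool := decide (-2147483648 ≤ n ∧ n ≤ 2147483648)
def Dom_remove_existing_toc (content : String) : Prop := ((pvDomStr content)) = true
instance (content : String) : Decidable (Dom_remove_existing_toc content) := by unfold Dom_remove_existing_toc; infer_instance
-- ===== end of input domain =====

-- B replaces A's three substring searches + filter + min() by a single left-to-right scan
-- stopping at the first newline followed by a rule or header marker (alternative decomposition, same cost).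


-- ===== PORT A =====
def remove_existing_toc (content : String) : String :=
  let s := content.toList
  let toc_start := PySem.Chars.find s "## Table of Contents".toList
  if toc_start = -1 then content
  else
    let search_from := toc_start + ("## Table of Contents".toList.length : Int)
    let patterns : List Int := [
      PySem.Chars.findFrom s "\n---".toList search_from,
      PySem.Chars.findFrom s "\n# ".toList search_from,
      PySem.Chars.findFrom s "\n## ".toList search_from]
    let valid := patterns.filter (fun p => p != -1)
    match PySem.List.min? valid id with
    | some next_section =>
        String.ofList (PySem.Chars.slice s none (some toc_start) ++
                       PySem.Chars.slice s (some (next_section + 1)) none)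
    | none => String.ofList (PySem.Chars.slice s none (some toc_start))

-- ===== PORT B =====
-- B's while-loop: scan from index i, stop at the first '\n' followed by '---', '# ' or '## '
def tocScanB : List Char → Nat → Option Nat
  | [], _ => none
  | c :: rest, i =>
    if c == '\n' && (PySem.Chars.startswith rest "---".toList ||
                     PySem.Chars.startswith rest "# ".toList ||
                     PySem.Chars.startswith rest "## ".toList)
    then some i else tocScanB rest (i + 1)

def remove_existing_toc_alt (content : String) : String :=
  let s := content.toList
  let toc_start := PySem.Chars.find s "## Table of Contents".toList
  if toc_start = -1 then content
  else
    let i0 := toc_start.toNat + "## Table of Contents".toList.length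
    match tocScanB (s.drop i0) i0 with
    | some i => String.ofList (s.take toc_start.toNat ++ s.drop (i + 1))
    | none => String.ofList (s.take toc_start.toNat)

-- ===== PRECONDITION & SPEC =====
def Spec_remove_existing_toc (content : String) (out : String) : Prop := out = remove_existing_toc_alt content
instance (content : String) (out : String) : Decidable (Spec_remove_existing_toc content out) := by unfold Spec_remove_existing_toc; infer_instance

-- ===== CLAIM (what is proved, stated in full; the proofs are below) =====
def Claim_equal_remove_existing_toc : Prop := ∀ (content : String), Dom_remove_existing_toc content → Spec_remove_existing_toc content (remove_existing_toc content)

-- ===== LEMMAS AND PROOFS =====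

-- the Bool condition B's scan tests at the head of a suffix
def markB : List Char → Bool
  | [] => false
  | c :: rest => c == '\n' && (PySem.Chars.startswith rest "---".toList ||
                               PySem.Chars.startswith rest "# ".toList ||
                               PySem.Chars.startswith rest "## ".toList)

-- least index satisfying a predicate, if any (proof-side helper only)
noncomputable def firstIdx (p : Nat → Prop) [DecidablePred p] : Option Nat :=
  @dite _ (∃ m, p m) (Classical.propDecidable _) (fun h => some (Nat.find h)) (fun _ => none)

def omin : Option Nat → Option Nat → Option Nat
  | none, b => b
  | some a, none => some a
  | some a, some b => some (min a b)

-- findFrom's -1 / value packaged as an Option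
def ov (k : Nat) : Option Nat → Int
  | none => -1
  | some F => (k : Int) + F

lemma firstIdx_pos {p : Nat → Prop} [DecidablePred p] (h : ∃ m, p m) :
    firstIdx p = some (Nat.find h) := by
  unfold firstIdx; rw [dif_pos h]

lemma firstIdx_neg {p : Nat → Prop} [DecidablePred p] (h : ¬ ∃ m, p m) :
    firstIdx p = none := by
  unfold firstIdx; rw [dif_neg h]

lemma firstIdx_congr (p q : Nat → Prop) [DecidablePred p] [DecidablePred q]
    (h : ∀ n, p n ↔ q n) : firstIdx p = firstIdx q := by
  by_cases hp : ∃ m, p m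
  · have hq : ∃ m, q m := ⟨hp.choose, (h _).1 hp.choose_spec⟩
    rw [firstIdx_pos hp, firstIdx_pos hq]
    congr 1
    rw [Nat.find_eq_iff]
    exact ⟨(h _).2 (Nat.find_spec hq), fun n hn hpn => Nat.find_min hq hn ((h _).1 hpn)⟩
  · have hq : ¬ ∃ m, q m := fun ⟨m, hm⟩ => hp ⟨m, (h m).2 hm⟩
    rw [firstIdx_neg hp, firstIdx_neg hq]

lemma firstIdx_or (p q : Nat → Prop) [DecidablePred p] [DecidablePred q] :
    firstIdx (fun m => p m ∨ q m) = omin (firstIdx p) (firstIdx q) := by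
  by_cases hp : ∃ m, p m <;> by_cases hq : ∃ m, q m
  · have hpq : ∃ m, p m ∨ q m := ⟨hp.choose, Or.inl hp.choose_spec⟩
    rw [firstIdx_pos hp, firstIdx_pos hq, firstIdx_pos hpq]
    show some _ = some (min _ _)
    congr 1
    apply le_antisymm
    · exact le_min (Nat.find_min' hpq (Or.inl (Nat.find_spec hp)))
        (Nat.find_min' hpq (Or.inr (Nat.find_spec hq)))
    · rcases Nat.find_spec hpq with h | h
      · exact min_le_of_left_le (Nat.find_min' hp h)
      · exact min_le_of_right_le (Nat.find_min' hq h)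
  · have hpq : ∃ m, p m ∨ q m := ⟨hp.choose, Or.inl hp.choose_spec⟩
    rw [firstIdx_pos hp, firstIdx_neg hq, firstIdx_pos hpq]
    show some _ = some _
    congr 1
    apply le_antisymm
    · exact Nat.find_min' hpq (Or.inl (Nat.find_spec hp))
    · rcases Nat.find_spec hpq with h | h
      · exact Nat.find_min' hp h
      · exact absurd ⟨_, h⟩ hq
  · have hpq : ∃ m, p m ∨ q m := ⟨hq.choose, Or.inr hq.choose_spec⟩
    rw [firstIdx_neg hp, firstIdx_pos hq, firstIdx_pos hpq]
    show some _ = some _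
    congr 1
    apply le_antisymm
    · exact Nat.find_min' hpq (Or.inr (Nat.find_spec hq))
    · rcases Nat.find_spec hpq with h | h
      · exact absurd ⟨_, h⟩ hp
      · exact Nat.find_min' hq h
  · have hpq : ¬ ∃ m, p m ∨ q m := by
      rintro ⟨m, h | h⟩
      · exact hp ⟨m, h⟩
      · exact hq ⟨m, h⟩
    rw [firstIdx_neg hp, firstIdx_neg hq, firstIdx_neg hpq]
    rfl

lemma infix_iff_drop (sub d : List Char) : sub <:+: d ↔ ∃ m, sub <+: d.drop m := by
  constructor
  · rintro ⟨pre, post, h⟩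
    refine ⟨pre.length, post, ?_⟩
    rw [← h, List.append_assoc, List.drop_left]
  · rintro ⟨m, r, hr⟩
    exact ⟨d.take m, r, by rw [List.append_assoc, hr, List.take_append_drop]⟩

lemma find_eq_firstIdx (d sub : List Char) :
    PySem.Chars.find d sub =
      match firstIdx (fun m => sub <+: d.drop m) with
      | none => -1
      | some F => (F : Int) := by
  have h0 : 0 ≤ d.length := Nat.zero_le _
  rw [← PySem.Chars.findFrom_zero]
  have h00 : (0 : Int) = ((0 : Nat) : Int) := by norm_num
  rw [h00]
  by_cases hex : ∃ m, sub <+: d.drop m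
  · rw [firstIdx_pos hex]
    have hne : PySem.Chars.findFrom d sub (((0 : Nat)) : Int) ≠ -1 := by
      intro hc
      rw [PySem.Chars.findFrom_natCast_eq_neg_one_iff d sub 0 h0, List.drop_zero] at hc
      exact hc ((infix_iff_drop sub d).2 hex)
    obtain ⟨hge, hpre, hmin⟩ := PySem.Chars.findFrom_natCast_spec d sub 0 h0 hne
    have hfind : Nat.find hex = (PySem.Chars.findFrom d sub (((0 : Nat)) : Int)).toNat := by
      apply le_antisymm
      · exact Nat.find_min' hex hpre
      · by_contra hlt
        push_neg at hlt
        exact hmin (Nat.find hex) (Nat.zero_le _) hlt (Nat.find_spec hex)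
    show _ = ((Nat.find hex : Nat) : Int)
    rw [hfind]
    omega
  · rw [firstIdx_neg hex]
    show PySem.Chars.findFrom d sub (((0 : Nat)) : Int) = -1
    rw [PySem.Chars.findFrom_natCast_eq_neg_one_iff d sub 0 h0, List.drop_zero]
    intro hc
    exact hex ((infix_iff_drop sub d).1 hc)

lemma pattern_eq (s sub : List Char) (k : Nat) (hk : k ≤ s.length) :
    PySem.Chars.findFrom s sub (k : Int) =
      ov k (firstIdx (fun m => sub <+: (s.drop k).drop m)) := by
  rw [PySem.Chars.findFrom_natCast s sub k hk, find_eq_firstIdx (s.drop k) sub]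
  cases h : firstIdx (fun m => sub <+: (s.drop k).drop m) with
  | none => simp [ov]
  | some F =>
    have hne : ((F : Nat) : Int) ≠ -1 := by omega
    simp [ov, hne]

lemma markB_iff (t : List Char) :
    markB t = true ↔ ("\n---".toList <+: t ∨ ("\n# ".toList <+: t ∨ "\n## ".toList <+: t)) := by
  cases t with
  | nil =>
    simp [markB]
  | cons c rest =>
    rw [show ("\n---".toList) = '\n' :: "---".toList from rfl,
        show ("\n# ".toList) = '\n' :: "# ".toList from rfl,
        show ("\n## ".toList) = '\n' :: "## ".toList from rfl]
    simp only [markB, Bool.and_eq_true, Bool.or_eq_true, beq_iff_eq,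
      PySem.Chars.startswith_iff, List.cons_prefix_cons]
    constructor
    · rintro ⟨h1, (h2 | h2) | h2⟩
      exacts [Or.inl ⟨h1.symm, h2⟩, Or.inr (Or.inl ⟨h1.symm, h2⟩), Or.inr (Or.inr ⟨h1.symm, h2⟩)]
    · rintro (⟨h1, h2⟩ | ⟨h1, h2⟩ | ⟨h1, h2⟩)
      exacts [⟨h1.symm, Or.inl (Or.inl h2)⟩, ⟨h1.symm, Or.inl (Or.inr h2)⟩, ⟨h1.symm, Or.inr h2⟩]

lemma tocScanB_eq (l : List Char) (i : Nat) :
    tocScanB l i = (firstIdx (fun m => markB (l.drop m) = true)).map (fun m => i + m) := by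
  induction l generalizing i with
  | nil =>
    have hno : ¬ ∃ m, markB ((List.nil (α := Char)).drop m) = true := by
      rintro ⟨m, hm⟩
      simp [markB] at hm
    rw [show tocScanB [] i = none from rfl, firstIdx_neg hno]
    rfl
  | cons c rest ih =>
    have step : tocScanB (c :: rest) i =
        if markB (c :: rest) then some i else tocScanB rest (i + 1) := rfl
    by_cases hQ : markB (c :: rest) = true
    · have hex : ∃ m, markB ((c :: rest).drop m) = true := ⟨0, hQ⟩
      have hz : Nat.find hex = 0 := by
        rw [Nat.find_eq_iff]
        exact ⟨hQ, by omega⟩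
      rw [step, if_pos hQ, firstIdx_pos hex, hz]
      rfl
    · rw [step, if_neg (by simpa using hQ), ih]
      by_cases hex : ∃ m, markB (rest.drop m) = true
      · have hex' : ∃ m, markB ((c :: rest).drop m) = true :=
          ⟨Nat.find hex + 1, by simpa using Nat.find_spec hex⟩
        have hfind : Nat.find hex' = Nat.find hex + 1 := by
          rw [Nat.find_eq_iff]
          refine ⟨by simpa using Nat.find_spec hex, ?_⟩
          intro n hn
          cases n with
          | zero => simpa using hQ
          | succ n => simpa using Nat.find_min hex (by omega)
        rw [firstIdx_pos hex, firstIdx_pos hex', hfind]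
        simp
        omega
      · have hex' : ¬ ∃ m, markB ((c :: rest).drop m) = true := by
          rintro ⟨m, hm⟩
          cases m with
          | zero => exact hQ (by simpa using hm)
          | succ m => exact hex ⟨m, by simpa using hm⟩
        rw [firstIdx_neg hex, firstIdx_neg hex']
        rfl

lemma bne_neg_one_of_nonneg (k F : Nat) : ((((k : Int) + F)) != -1) = true := by
  simp [bne]
  omega

lemma min?_patterns (k : Nat) (o1 o2 o3 : Option Nat) :
    PySem.List.min? (([ov k o1, ov k o2, ov k o3]).filter (fun p => p != -1)) id
      = (omin o1 (omin o2 o3)).map (fun m : Nat => (((k + m : Nat)) : Int)) := by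
  rcases o1 with _ | F1 <;> rcases o2 with _ | F2 <;> rcases o3 with _ | F3 <;>
    simp [ov, omin, PySem.List.min?, List.filter, List.foldl, bne_neg_one_of_nonneg] <;>
    (try split_ifs) <;> (try simp) <;> (try split_ifs) <;> (try simp) <;> omega

lemma ports_agree (content : String) :
    remove_existing_toc content = remove_existing_toc_alt content := by
  simp only [remove_existing_toc, remove_existing_toc_alt]
  set s := content.toList with hs
  by_cases h : PySem.Chars.find s "## Table of Contents".toList = -1
  · rw [if_pos h, if_pos h]
  · rw [if_neg h, if_neg h]
    have hfe := find_eq_firstIdx s "## Table of Contents".toList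
    have hex0 : ∃ m, "## Table of Contents".toList <+: s.drop m := by
      by_contra hc
      rw [firstIdx_neg hc] at hfe
      exact h hfe
    rw [firstIdx_pos hex0] at hfe
    set F : Nat := Nat.find hex0 with hFdef
    have hF : PySem.Chars.find s "## Table of Contents".toList = (F : Int) := hfe
    have hpre : "## Table of Contents".toList <+: s.drop F := Nat.find_spec hex0
    have hlen20 : ("## Table of Contents".toList).length = 20 := rfl
    have hlen : F + 20 ≤ s.length := by
      have h1 := hpre.length_le
      rw [hlen20, List.length_drop] at h1
      omega
    have hsearch : PySem.Chars.find s "## Table of Contents".toList +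
        ("## Table of Contents".toList.length : Int) = ((F + 20 : Nat) : Int) := by
      rw [hF, hlen20]
      push_cast
      ring
    have htoc : (PySem.Chars.find s "## Table of Contents".toList).toNat +
        "## Table of Contents".toList.length = F + 20 := by
      rw [hF, hlen20]
      omega
    rw [hsearch, htoc]
    rw [pattern_eq s "\n---".toList (F + 20) hlen, pattern_eq s "\n# ".toList (F + 20) hlen,
        pattern_eq s "\n## ".toList (F + 20) hlen]
    rw [min?_patterns, tocScanB_eq]
    have hcong : firstIdx (fun m => markB ((s.drop (F + 20)).drop m) = true)
        = omin (firstIdx (fun m => "\n---".toList <+: (s.drop (F + 20)).drop m))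
               (omin (firstIdx (fun m => "\n# ".toList <+: (s.drop (F + 20)).drop m))
                     (firstIdx (fun m => "\n## ".toList <+: (s.drop (F + 20)).drop m))) := by
      rw [firstIdx_congr (fun m => markB ((s.drop (F + 20)).drop m) = true)
            (fun m => ("\n---".toList <+: (s.drop (F + 20)).drop m) ∨
                      (("\n# ".toList <+: (s.drop (F + 20)).drop m) ∨
                       ("\n## ".toList <+: (s.drop (F + 20)).drop m)))
            (fun m => markB_iff _)]
      rw [firstIdx_or, firstIdx_or]
    rw [hcong]
    have hslice0 : PySem.Chars.slice s none (some (PySem.Chars.find s "## Table of Contents".toList))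
        = s.take ((PySem.Chars.find s "## Table of Contents".toList).toNat) := by
      rw [PySem.Chars.slice_eq_listSlice,
          PySem.List.slice_to s (show (0 : Int) ≤ PySem.Chars.find s "## Table of Contents".toList by omega)]
    rw [hslice0]
    rcases omin (firstIdx fun m => "\n---".toList <+: (s.drop (F + 20)).drop m)
        (omin (firstIdx fun m => "\n# ".toList <+: (s.drop (F + 20)).drop m)
              (firstIdx fun m => "\n## ".toList <+: (s.drop (F + 20)).drop m)) with _ | m
    · rfl
    · have hslice1 : PySem.Chars.slice s (some (((F + 20 + m : Nat) : Int) + 1)) none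
          = s.drop (F + 20 + m + 1) := by
        rw [PySem.Chars.slice_eq_listSlice,
            PySem.List.slice_from s (show (0 : Int) ≤ ((F + 20 + m : Nat) : Int) + 1 by omega)]
        congr 1
      show String.ofList (_ ++ PySem.Chars.slice s (some (((F + 20 + m : Nat) : Int) + 1)) none) = _
      rw [hslice1]
      rfl

-- ===== VERDICT (by name: the statement is the Claim_ definition above) =====
theorem remove_existing_toc_spec : Claim_equal_remove_existing_toc := by
  intro content _
  unfold Spec_remove_existing_toc
  exact ports_agree content
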